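-- pv_equiv track=rewrite | github.com/apartsin/EnergeticDiffusion2 | m2_bundle/m2_dft_pipeline.py | molecular_formula
-- ===== SOURCE A (Python) =====
-- def molecular_formula(atoms):
--     from collections import Counter
--     c = Counter(s for s, *_ in atoms)
--     order = ["C", "H", "N", "O", "F", "Cl"]
--     parts = []
--     for s in order:
--         if c.get(s, 0): parts.append(f"{s}{c[s]}")
--     for s in sorted(c):
--         if s not in order and c[s]: parts.append(f"{s}{c[s]}")
--     return "".join(parts)
-- ===== SOURCE B (Python) =====
-- def molecular_formula(atoms):
--     counts = {}
--     for a in atoms: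
--         s = a[0]
--         counts[s] = counts.get(s, 0) + 1
--     order = ["C", "H", "N", "O", "F", "Cl"]
--
--     def key(s):
--         return (order.index(s), "") if s in order else (len(order), s)
--
--     return "".join(f"{s}{counts[s]}" for s in sorted(counts, key=key))
-- ===== Notes on version B (the rewrite author's own statement) =====
-- stated objective: idiomatic
-- what changed: Replaces A's two emission loops (fixed Hill-priority scan, then alphabetical scan over the sorted remainder) with a single pass over the distinct symbols sorted once by a composite key (priority index, '') / (len(order), symbol), and builds the counts with a plain dict loop instead of Counter.
import Mathlib
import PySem

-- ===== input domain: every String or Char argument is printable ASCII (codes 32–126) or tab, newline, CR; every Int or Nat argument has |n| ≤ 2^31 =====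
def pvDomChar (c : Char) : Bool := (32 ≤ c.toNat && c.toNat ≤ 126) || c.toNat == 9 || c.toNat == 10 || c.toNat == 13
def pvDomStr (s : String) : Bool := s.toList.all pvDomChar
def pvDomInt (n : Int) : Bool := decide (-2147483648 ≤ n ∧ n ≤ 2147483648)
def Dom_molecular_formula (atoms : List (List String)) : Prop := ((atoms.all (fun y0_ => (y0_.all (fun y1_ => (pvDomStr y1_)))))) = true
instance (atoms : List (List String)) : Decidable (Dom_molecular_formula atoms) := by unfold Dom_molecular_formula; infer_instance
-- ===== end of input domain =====

-- B builds the formula in ONE sorted pass over the distinct symbols with a composite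
-- (priority-index, symbol) key, instead of A's two separate emission loops; same cost, more idiomatic.

-- Hill priority list, a literal in both programs
def mfOrder : List String := ["C", "H", "N", "O", "F", "Cl"]

-- ===== PORT A =====
def molecular_formula (atoms : List (List String)) : String :=
  -- c = Counter(s for s, *_ in atoms)   (inner lists are nonempty under Pre_)
  let c := PySem.Dict.counter (atoms.map (fun a => a.headI))
  -- first loop: the Hill-priority symbols, in the fixed order
  let parts : List String :=
    mfOrder.foldl
      (fun parts s => if c.getD s 0 ≠ 0 then parts ++ [s ++ PySem.Int.toStr (c.getD s 0)] else parts) []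
  -- second loop: the remaining symbols, alphabetically
  let parts :=
    (PySem.List.sorted c.keys (fun x => x) false).foldl
      (fun parts s =>
        if s ∉ mfOrder ∧ c.getD s 0 ≠ 0 then parts ++ [s ++ PySem.Int.toStr (c.getD s 0)] else parts)
      parts
  PySem.Str.join "" parts

-- ===== PORT B =====
-- key(s) = (order.index(s), "") if s in order else (len(order), s), as the two components of a tuple key
def mfKey1 (s : String) : Nat :=
  if s ∈ mfOrder then (PySem.List.index? mfOrder s).getD 0 else mfOrder.length
def mfKey2 (s : String) : String :=
  if s ∈ mfOrder then "" else s

def molecular_formula_alt (atoms : List (List String)) : String :=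
  let counts := atoms.foldl
    (fun d a => let s := a.headI; d.insert s (d.getD s 0 + 1)) PySem.Dict.empty
  PySem.Str.join ""
    ((PySem.List.sorted2 counts.keys mfKey1 mfKey2 false).map
      (fun s => s ++ PySem.Int.toStr (counts.getD s 0)))

-- ===== PRECONDITION & SPEC =====
-- Pre_ excludes inputs containing an empty inner list: there A raises ValueError (unpacking 's, *_')
-- and B raises IndexError (a[0]).
def Pre_molecular_formula (atoms : List (List String)) : Prop := ∀ a ∈ atoms, a ≠ []
instance (atoms : List (List String)) : Decidable (Pre_molecular_formula atoms) := by
  unfold Pre_molecular_formula; infer_instance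
def pvWitness_molecular_formula : List (List String) :=
  [["C"], ["H", "x"], ["C"], ["Na"], ["H"]]
def Spec_molecular_formula (atoms : List (List String)) (out : String) : Prop :=
  out = molecular_formula_alt atoms
instance (atoms : List (List String)) (out : String) : Decidable (Spec_molecular_formula atoms out) := by
  unfold Spec_molecular_formula; infer_instance

-- ===== CLAIM (what is proved, stated in full; the proofs are below) =====
def Claim_equal_molecular_formula : Prop :=
  ∀ (atoms : List (List String)), Dom_molecular_formula atoms →
    Pre_molecular_formula atoms → Spec_molecular_formula atoms (molecular_formula atoms)

-- ===== LEMMAS AND PROOFS =====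

-- sorted2 with component keys k1, k2 is sorted with the lexicographic key toLex (k1 x, k2 x)
theorem sorted2_eq_sorted_toLex (xs : List String) (k1 : String → Nat) (k2 : String → String) :
    PySem.List.sorted2 xs k1 k2 false
      = PySem.List.sorted xs (fun x => toLex (k1 x, k2 x)) false := by
  unfold PySem.List.sorted2 PySem.List.sorted
  have hb : (fun a b => decide (k1 a < k1 b) || (!decide (k1 b < k1 a) && decide (k2 a < k2 b)))
      = (fun a b : String => decide (toLex (k1 a, k2 a) < toLex (k1 b, k2 b))) := by
    funext a b
    by_cases h1 : k1 a < k1 b <;> by_cases h2 : k1 b < k1 a <;> by_cases h3 : k2 a < k2 b <;>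
      simp [Prod.Lex.lt_iff, h1, h2, h3] <;> omega
  simp only [if_neg (by decide : ¬ (false = true))]
  rw [hb]

theorem mfKey1_lt_of_mem {s : String} (h : s ∈ mfOrder) : mfKey1 s < 6 := by
  fin_cases h <;> decide

theorem mfKey1_of_not_mem {s : String} (h : s ∉ mfOrder) : mfKey1 s = 6 := by
  simp only [mfKey1, if_neg h]; rfl

theorem mfKey2_of_not_mem {s : String} (h : s ∉ mfOrder) : mfKey2 s = s := by
  simp [mfKey2, h]

theorem mfOrder_pairwise : mfOrder.Pairwise (fun a b => mfKey1 a < mfKey1 b) := by decide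

theorem sorted_keys_pairwise_lt (ks : List String) (hnd : ks.Nodup) :
    (PySem.List.sorted ks (fun x => x) false).Pairwise (· < ·) := by
  have hle := PySem.List.sorted_pairwise ks (fun x => x)
  have hnd' : (PySem.List.sorted ks (fun x => x) false).Nodup :=
    (PySem.List.sorted_perm ks (fun x => x) false).nodup_iff.mpr hnd
  have := hle.and hnd'
  exact this.imp (fun h => lt_of_le_of_ne h.1 h.2)

-- the single sorted2 pass enumerates: the priority symbols present, in priority order,
-- then the remaining symbols alphabetically
theorem sorted2_keys_split (ks : List String) (hnd : ks.Nodup) :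
    PySem.List.sorted2 ks mfKey1 mfKey2 false
      = mfOrder.filter (fun s => decide (s ∈ ks))
        ++ (PySem.List.sorted ks (fun x => x) false).filter (fun s => decide (s ∉ mfOrder)) := by
  rw [sorted2_eq_sorted_toLex]
  apply PySem.List.sorted_eq_of_perm_of_pairwise_lt
  · -- the right-hand side is a permutation of ks
    have h1 : (mfOrder.filter (fun s => decide (s ∈ ks))).Perm (ks.filter (fun s => decide (s ∈ mfOrder))) := by
      rw [List.perm_ext_iff_of_nodup (List.Nodup.filter _ (by decide)) (List.Nodup.filter _ hnd)]
      intro a; simp [and_comm]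
    have h2 : ((PySem.List.sorted ks (fun x => x) false).filter (fun s => decide (s ∉ mfOrder))).Perm
        (ks.filter (fun s => decide (s ∉ mfOrder))) :=
      (PySem.List.sorted_perm ks (fun x => x) false).filter _
    refine (h1.append h2).trans ?_
    have := List.filter_append_perm (fun s => decide (s ∈ mfOrder)) ks
    simpa using this
  · -- and it is strictly increasing under the lexicographic key
    rw [List.pairwise_append]
    refine ⟨?_, ?_, ?_⟩
    · exact (mfOrder_pairwise.filter _).imp (fun h => Prod.Lex.lt_iff.mpr (Or.inl (by simpa using h)))
    · have hpw := (sorted_keys_pairwise_lt ks hnd).filter (fun s => decide (s ∉ mfOrder))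
      refine hpw.imp_of_mem ?_
      intro a b ha hb hab
      have ha' : a ∉ mfOrder := by simpa using (List.of_mem_filter ha)
      have hb' : b ∉ mfOrder := by simpa using (List.of_mem_filter hb)
      apply Prod.Lex.lt_iff.mpr
      simp [mfKey1_of_not_mem ha', mfKey1_of_not_mem hb', mfKey2_of_not_mem ha',
        mfKey2_of_not_mem hb', hab]
    · intro a ha b hb
      have ha' : a ∈ mfOrder := List.mem_of_mem_filter ha
      have hb' : b ∉ mfOrder := by simpa using (List.of_mem_filter hb)
      apply Prod.Lex.lt_iff.mpr
      exact Or.inl (by simpa [mfKey1_of_not_mem hb'] using mfKey1_lt_of_mem ha')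

theorem main_eq (atoms : List (List String)) :
    molecular_formula atoms = molecular_formula_alt atoms := by
  unfold molecular_formula molecular_formula_alt
  have hc : atoms.foldl (fun d a => let s := a.headI; d.insert s (d.getD s 0 + 1)) PySem.Dict.empty
      = PySem.Dict.counter (atoms.map (fun a => a.headI)) := by
    rw [← PySem.Dict.foldl_insert_getD_add_one_eq_counter, List.foldl_map]
  simp only [hc]
  set xs := atoms.map (fun a => a.headI) with hxs
  set c := PySem.Dict.counter xs with hcc
  have hmem : ∀ s, (c.getD s 0 ≠ 0) ↔ s ∈ c.keys := by
    intro s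
    rw [hcc, PySem.Dict.getD_counter, PySem.Dict.keys_counter, PySem.Set.mem_ofList]
    simp [List.count_eq_zero]
  rw [sorted2_keys_split c.keys (by rw [hcc]; exact PySem.Dict.nodup_keys_counter xs)]
  rw [PySem.List.foldl_append_ite (fun s => c.getD s 0 ≠ 0) (fun s => s ++ PySem.Int.toStr (c.getD s 0)),
      PySem.List.foldl_append_ite (fun s => s ∉ mfOrder ∧ c.getD s 0 ≠ 0) (fun s => s ++ PySem.Int.toStr (c.getD s 0))]
  have hA1 : mfOrder.filter (fun s => decide (c.getD s 0 ≠ 0))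
      = mfOrder.filter (fun s => decide (s ∈ c.keys)) :=
    List.filter_congr (fun s _ => by simp [hmem s])
  have hA2 : (PySem.List.sorted c.keys (fun x => x) false).filter
        (fun s => decide (s ∉ mfOrder ∧ c.getD s 0 ≠ 0))
      = (PySem.List.sorted c.keys (fun x => x) false).filter (fun s => decide (s ∉ mfOrder)) :=
    List.filter_congr (fun s hs => by
      have : s ∈ c.keys := (PySem.List.mem_sorted _ _ _ _).mp hs
      simp [(hmem s).mpr this])
  rw [hA1, hA2, List.map_append]
  simp

-- ===== VERDICT (by name: the statement is the Claim_ definition above) =====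
theorem molecular_formula_spec : Claim_equal_molecular_formula := by
  intro atoms _ _
  exact main_eq atoms
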